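-- pv_equiv track=rewrite | github.com/laxmi-narayan-87/DSA | Python3/Medium/3722-lexicographically-smallest-string-after-reverse/3722-lexicographically-smallest-string-after-reverse-03-23-2026-00-57-03.py | lexSmallest
-- ===== SOURCE A (Python) =====
-- def lexSmallest(s: str) -> str:
--     n=len(s)
--     smallest=s
--     for i in range(1,n+1):
--         cad=s[:i][::-1]+s[i:]
--         smallest=min(cad,smallest)
--         suf=s[:-i]+s[-i:][::-1]
--         smallest=min(smallest,suf)
--     return smallest
-- ===== SOURCE B (Python) =====
-- def lexSmallest(s: str) -> str:
--     # Prune: the winner must start with the minimal character c of s, so only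
--     # candidates whose first character is c need to be materialised and compared.
--     if not s:
--         return s
--     n = len(s)
--     c = min(s)
--     r = s[::-1]
--     best = min(r[n - i:] + s[i:] for i in range(1, n + 1) if s[i - 1] == c)
--     if s[0] == c:
--         best = min(best, min(s[:j] + r[:n - j] for j in range(0, n)))
--     elif s[-1] == c:
--         best = min(best, r)
--     return best
-- ===== Notes on version B (the rewrite author's own statement) =====
-- stated objective: faster
-- what changed: Instead of materialising and comparing all 2n prefix/suffix reversal candidates, B computes the minimal character c of s once and compares only the candidates whose first character is c (any other candidate is dominated), via one precomputed reversed copy of s instead of per-iteration reversals.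
import Mathlib
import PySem

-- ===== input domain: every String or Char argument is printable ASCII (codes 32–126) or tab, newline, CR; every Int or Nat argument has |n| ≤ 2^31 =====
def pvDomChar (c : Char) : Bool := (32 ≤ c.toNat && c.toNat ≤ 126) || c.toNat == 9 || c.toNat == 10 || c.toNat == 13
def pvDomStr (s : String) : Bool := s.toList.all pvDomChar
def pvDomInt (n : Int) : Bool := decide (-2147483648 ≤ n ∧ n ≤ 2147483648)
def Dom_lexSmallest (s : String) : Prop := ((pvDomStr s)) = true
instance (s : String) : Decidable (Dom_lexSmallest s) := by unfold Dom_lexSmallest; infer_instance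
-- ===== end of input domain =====

-- B prunes the 2n reversal candidates to those beginning with the minimal character of s
-- (only such a candidate can be the lexicographic minimum); proved to return exactly A's value.

-- ===== PORT A =====
def lexSmallest (s : String) : String :=
  let cs := s.toList
  let n : Int := cs.length
  -- for i in range(1, n+1): smallest = min(cad, smallest); smallest = min(smallest, suf)
  String.ofList <| (PySem.List.pyRange 1 (n + 1) 1).foldl (fun smallest i =>
    -- cad = s[:i][::-1] + s[i:]   (xs[::-1] is reverse: PySem.List.slice?_none_none_neg_one)
    let cad := (PySem.List.slice cs none (some i)).reverse ++ PySem.List.slice cs (some i) none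
    let smallest := min cad smallest
    -- suf = s[:-i] + s[-i:][::-1]
    let suf := PySem.List.slice cs none (some (-i)) ++ (PySem.List.slice cs (some (-i)) none).reverse
    min smallest suf) cs

-- ===== PORT B =====
def lexSmallest_alt (s : String) : String :=
  let cs := s.toList
  if cs = [] then s
  else
    let n : Int := cs.length
    -- c = min(s)  (cs ≠ [], so the default is never used)
    let c : Char := (PySem.List.min? cs (fun x => x)).getD ' '
    -- r = s[::-1]  (PySem.List.slice?_none_none_neg_one)
    let r := cs.reverse
    -- best = min(r[n-i:] + s[i:] for i in range(1, n+1) if s[i-1] == c)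
    -- (the generator's elements, in order, as a list; nonempty since c occurs in s)
    let best := (PySem.List.min? ((PySem.List.pyRange 1 (n + 1) 1).foldl (fun acc i =>
      if PySem.List.pyGetD cs (i - 1) ' ' = c then
        acc ++ [PySem.List.slice r (some (n - i)) none ++ PySem.List.slice cs (some i) none]
      else acc) []) (fun x => x)).getD []
    -- if s[0] == c: best = min(best, min(s[:j] + r[:n-j] for j in range(0, n)))
    -- elif s[-1] == c: best = min(best, r)
    let best :=
      if PySem.List.pyGetD cs 0 ' ' = c then
        min best ((PySem.List.min? ((PySem.List.pyRange 0 n 1).map (fun j =>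
          PySem.List.slice cs none (some j) ++ PySem.List.slice r none (some (n - j)))) (fun x => x)).getD [])
      else if PySem.List.pyGetD cs (-1) ' ' = c then min best r
      else best
    String.ofList best

-- ===== PRECONDITION & SPEC =====
def Spec_lexSmallest (s : String) (out : String) : Prop := out = lexSmallest_alt s
instance (s : String) (out : String) : Decidable (Spec_lexSmallest s out) := by unfold Spec_lexSmallest; infer_instance

-- ===== CLAIM (what is proved, stated in full; the proofs are below) =====
def Claim_equal_lexSmallest : Prop := ∀ (s : String), Dom_lexSmallest s → Spec_lexSmallest s (lexSmallest s)

-- ===== LEMMAS AND PROOFS =====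

def candP (cs : List Char) (m : Nat) : List Char := (cs.take m).reverse ++ cs.drop m

def candS (cs : List Char) (m : Nat) : List Char :=
  cs.take (cs.length - m) ++ (cs.drop (cs.length - m)).reverse

lemma foldl_min2 {α : Type} [LinearOrder α] (f g : Nat → α) (l : List Nat) (a : α) :
    l.foldl (fun sm k => min (min (f k) sm) (g k)) a
      = List.foldl min a (l.flatMap fun k => [f k, g k]) := by
  induction l generalizing a with
  | nil => rfl
  | cons h t ih => simp [ih, min_comm (f h) a]

lemma A_norm (s : String) :
    lexSmallest s = String.ofList (List.foldl min s.toList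
      ((List.range s.toList.length).flatMap
        (fun k => [candP s.toList (k + 1), candS s.toList (k + 1)]))) := by
  simp only [lexSmallest, PySem.List.pyRange_one,
    show ((s.toList.length:Int) + 1 - 1).toNat = s.toList.length from by omega,
    List.foldl_map]
  simp only [show ∀ k : Nat, (1:Int) + (k:Int) = ((k+1 : Nat) : Int) from by intro k; push_cast; ring]
  simp only [PySem.List.slice_to_natCast, PySem.List.slice_from_natCast,
             PySem.List.slice_to_neg_natCast, PySem.List.slice_from_neg_natCast, Nat.succ_pos]
  simp only [candP, candS]
  rw [foldl_min2 (fun k => (s.toList.take (k+1)).reverse ++ s.toList.drop (k+1))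
      (fun k => s.toList.take (s.toList.length - (k+1)) ++ (s.toList.drop (s.toList.length-(k+1))).reverse)]

def keptList (cs : List Char) (c : Char) : List (List Char) :=
  ((List.range cs.length).filter (fun k => cs.getD k ' ' = c)).map (fun k => candP cs (k + 1))
  ++ (if cs.getD 0 ' ' = c then (List.range cs.length).map (fun j => cs.take j ++ (cs.drop j).reverse)
      else if cs.getLast? = some c then [cs.reverse] else [])

lemma foldl_min_assoc (a y : List Char) (t : List (List Char)) :
    t.foldl min (min a y) = min a (t.foldl min y) := by
  induction t generalizing y with
  | nil => rfl
  | cons z t ih => simp only [List.foldl_cons, min_assoc]; rw [ih]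

lemma min?_append_chars (X Y : List (List Char)) (hX : X ≠ []) (hY : Y ≠ []) :
    (PySem.List.min? (X ++ Y) (fun x => x)).getD []
      = min ((PySem.List.min? X (fun x => x)).getD []) ((PySem.List.min? Y (fun x => x)).getD []) := by
  obtain ⟨x, xt, rfl⟩ := List.exists_cons_of_ne_nil hX
  obtain ⟨y, yt, rfl⟩ := List.exists_cons_of_ne_nil hY
  have bridge : ∀ (Z : List (List Char)), (PySem.List.min? Z (fun x => x))
      = @PySem.List.min? (List Char) (List Char) LinearOrder.toPartialOrder.toPreorder.toLT
          LinearOrder.toDecidableLT Z (fun x => x) := fun Z => by congr 1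
  rw [List.cons_append, bridge, bridge, bridge, PySem.List.min?_id_cons, PySem.List.min?_id_cons,
      PySem.List.min?_id_cons]
  simp only [Option.getD_some]
  rw [List.foldl_append, List.foldl_cons]
  exact foldl_min_assoc _ _ _

lemma B_norm (s : String) (hne : s.toList ≠ []) (c : Char)
    (hc : PySem.List.min? s.toList (fun x => x) = some c) :
    lexSmallest_alt s
      = String.ofList ((PySem.List.min? (keptList s.toList c) (fun x => x)).getD []) := by
  simp only [lexSmallest_alt, if_neg hne, hc, Option.getD_some]
  rw [PySem.List.foldl_append_ite (fun i => PySem.List.pyGetD s.toList (i-1) ' ' = c)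
        (fun i => PySem.List.slice s.toList.reverse (some ((s.toList.length:Int) - i)) none
          ++ PySem.List.slice s.toList (some i) none) _ []]
  simp only [List.nil_append, PySem.List.pyRange_one,
    show ((s.toList.length:Int) + 1 - 1).toNat = s.toList.length from by omega,
    List.filter_map, List.map_map]
  have h1 : List.filter ((fun x => decide (PySem.List.pyGetD s.toList (x - 1) ' ' = c)) ∘ fun k => (1:Int) + ↑k)
        (List.range s.toList.length)
      = List.filter (fun k => decide (s.toList.getD k ' ' = c)) (List.range s.toList.length) := by
    apply List.filter_congr
    intro k _
    have : (1:Int) + ↑k - 1 = ((k:Nat):Int) := by omega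
    simp [this, PySem.List.pyGetD_natCast]
  have h2 : List.map ((fun i =>
        PySem.List.slice s.toList.reverse (some ((s.toList.length:Int) - i)) none ++
          PySem.List.slice s.toList (some i) none) ∘ fun k => (1:Int) + ↑k)
        (List.filter (fun k => decide (s.toList.getD k ' ' = c)) (List.range s.toList.length))
      = List.map (fun k => candP s.toList (k + 1))
        (List.filter (fun k => decide (s.toList.getD k ' ' = c)) (List.range s.toList.length)) := by
    apply List.map_congr_left
    intro k hk
    have hkn : k < s.toList.length := List.mem_range.mp (List.mem_filter.mp hk).1
    have e2 : (1:Int) + ↑k = (((k+1) : Nat) : Int) := by omega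
    have e1 : (s.toList.length:Int) - (((k+1):Nat):Int) = ((s.toList.length - (k+1) : Nat) : Int) := by omega
    simp only [Function.comp, e2]
    rw [e1, PySem.List.slice_from_natCast, PySem.List.slice_from_natCast, candP, List.reverse_take]
  have h4 : List.map ((fun j =>
        PySem.List.slice s.toList none (some j) ++
          PySem.List.slice s.toList.reverse none (some ((s.toList.length:Int) - j))) ∘ fun k => (0:Int) + ↑k)
        (List.range ((s.toList.length:Int) - 0).toNat)
      = List.map (fun j => s.toList.take j ++ (s.toList.drop j).reverse) (List.range s.toList.length) := by
    rw [show (((s.toList.length:Int)) - 0).toNat = s.toList.length from by omega]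
    apply List.map_congr_left
    intro k hk
    have hkn : k < s.toList.length := List.mem_range.mp hk
    have e2 : (0:Int) + ↑k = ((k : Nat) : Int) := by omega
    have e1 : (s.toList.length:Int) - ((k:Nat):Int) = ((s.toList.length - k : Nat) : Int) := by omega
    simp only [Function.comp, e2]
    rw [e1, PySem.List.slice_to_natCast, PySem.List.slice_to_natCast, List.reverse_drop]
  rw [h1, h2, h4]
  rw [PySem.List.pyGetD_zero, PySem.List.pyGetD_neg_one s.toList ' ' hne, keptList,
      List.getLast?_eq_some_getLast hne]
  simp only [Option.some_inj]
  obtain ⟨k0, hk0, hk0c⟩ := List.mem_iff_getElem.mp (PySem.List.min?_mem hc)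
  have hk0d : s.toList.getD k0 ' ' = c := by rw [List.getD_eq_getElem _ ' ' hk0]; exact hk0c
  have hKP : List.map (fun k => candP s.toList (k + 1))
      (List.filter (fun k => decide (s.toList.getD k ' ' = c)) (List.range s.toList.length)) ≠ [] :=
    List.ne_nil_of_mem (List.mem_map_of_mem
      (List.mem_filter.mpr ⟨List.mem_range.mpr hk0, by simpa using hk0d⟩))
  have hKJ : List.map (fun j => s.toList.take j ++ (s.toList.drop j).reverse)
      (List.range s.toList.length) ≠ [] := by
    have : 0 < s.toList.length := List.length_pos_iff.mpr hne
    simp only [ne_eq, List.map_eq_nil_iff, List.range_eq_nil]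
    omega
  split_ifs with h0 hl
  · rw [min?_append_chars _ _ hKP hKJ]
  · rw [min?_append_chars _ _ hKP (by simp : ([s.toList.reverse] : List (List Char)) ≠ [])]
    rfl
  · rw [List.append_nil]

lemma candP_head (cs : List Char) (k : Nat) (hk : k < cs.length) :
    ∃ t, candP cs (k+1) = cs.getD k ' ' :: t := by
  refine ⟨(cs.take k).reverse ++ cs.drop (k+1), ?_⟩
  rw [candP, List.take_succ_eq_append_getElem hk, List.reverse_append,
      List.getD_eq_getElem cs ' ' hk]
  simp

lemma candP_one (cs : List Char) : candP cs 1 = cs := by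
  cases cs <;> simp [candP]

lemma candS_self (cs : List Char) : candS cs cs.length = cs.reverse := by
  simp [candS]

lemma candS_head (cs : List Char) (m : Nat) (hm : m < cs.length) :
    ∃ t, candS cs m = cs.getD 0 ' ' :: t := by
  obtain ⟨j, hj⟩ : ∃ j, cs.length - m = j + 1 := ⟨cs.length - m - 1, by omega⟩
  cases cs with
  | nil => simp at hm
  | cons a tl =>
    refine ⟨tl.take j ++ ((a :: tl).drop ((a :: tl).length - m)).reverse, ?_⟩
    simp only [candS, hj, List.take_succ_cons, List.getD_cons_zero, List.cons_append]

lemma rev_head (cs : List Char) (hne : cs ≠ []) :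
    ∃ t, cs.reverse = cs.getLast hne :: t := by
  refine ⟨cs.dropLast.reverse, ?_⟩
  conv_lhs => rw [← List.dropLast_append_getLast hne]
  simp

lemma memK_P (cs : List Char) (c : Char) (k : Nat) (hk : k < cs.length)
    (h : cs.getD k ' ' = c) : candP cs (k+1) ∈ keptList cs c := by
  apply List.mem_append_left
  exact List.mem_map_of_mem (List.mem_filter.mpr ⟨List.mem_range.mpr hk, by simpa using h⟩)

lemma memK_S (cs : List Char) (c : Char) (j : Nat) (hj : j < cs.length)
    (h0 : cs.getD 0 ' ' = c) :
    cs.take j ++ (cs.drop j).reverse ∈ keptList cs c := by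
  apply List.mem_append_right
  rw [if_pos h0]
  exact List.mem_map_of_mem (List.mem_range.mpr hj)

lemma memK_rev (cs : List Char) (c : Char) (hne : cs ≠ [])
    (h : cs.getLast hne = c) : cs.reverse ∈ keptList cs c := by
  by_cases h0 : cs.getD 0 ' ' = c
  · have := memK_S cs c 0 (by cases cs with
      | nil => exact absurd rfl hne
      | cons a t => simp) h0
    simpa using this
  · apply List.mem_append_right
    rw [if_neg h0, if_pos (by rw [List.getLast?_eq_some_getLast hne, h])]
    simp

lemma memLA_P (cs : List Char) (k : Nat) (hk : k < cs.length) :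
    candP cs (k+1) ∈ (List.range cs.length).flatMap
      (fun k => [candP cs (k + 1), candS cs (k + 1)]) :=
  List.mem_flatMap.mpr ⟨k, List.mem_range.mpr hk, by simp⟩

lemma memLA_S (cs : List Char) (k : Nat) (hk : k < cs.length) :
    candS cs (k+1) ∈ (List.range cs.length).flatMap
      (fun k => [candP cs (k + 1), candS cs (k + 1)]) :=
  List.mem_flatMap.mpr ⟨k, List.mem_range.mpr hk, by simp⟩

lemma kept_sub (cs : List Char) (c : Char) (x : List Char) (hx : x ∈ keptList cs c) :
    x ∈ (List.range cs.length).flatMap (fun k => [candP cs (k + 1), candS cs (k + 1)]) := by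
  rcases List.mem_append.mp hx with h | h
  · obtain ⟨k, hk, rfl⟩ := List.mem_map.mp h
    exact memLA_P cs k (List.mem_range.mp (List.mem_filter.mp hk).1)
  · split_ifs at h with h0 hl
    · obtain ⟨j, hj, rfl⟩ := List.mem_map.mp h
      have hjn : j < cs.length := List.mem_range.mp hj
      have : cs.take j ++ (cs.drop j).reverse = candS cs ((cs.length - j - 1) + 1) := by
        have e : cs.length - ((cs.length - j - 1) + 1) = j := by omega
        rw [candS, e]
      rw [this]
      exact memLA_S cs _ (by omega)
    · rcases List.mem_singleton.mp h with rfl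
      have hne : cs ≠ [] := by
        intro h'; rw [h'] at hl; simp at hl
      have hn : 0 < cs.length := List.length_pos_iff.mpr hne
      have e : cs.reverse = candS cs ((cs.length - 1) + 1) := by
        rw [show (cs.length - 1) + 1 = cs.length from by omega, candS_self]
      rw [e]
      exact memLA_S cs _ (by omega)
    · simp at h

lemma master (cs : List Char) (hne : cs ≠ []) (c : Char)
    (hc : PySem.List.min? cs (fun x => x) = some c) :
    List.foldl min cs ((List.range cs.length).flatMap
        (fun k => [candP cs (k + 1), candS cs (k + 1)]))
      = (PySem.List.min? (keptList cs c) (fun x => x)).getD [] := by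
  have hcmem : c ∈ cs := PySem.List.min?_mem hc
  have hcmin : ∀ y ∈ cs, c ≤ y := fun y hy => by simpa using PySem.List.min?_isMin hc y hy
  obtain ⟨k0, hk0, hk0c⟩ := List.mem_iff_getElem.mp hcmem
  have hk0d : cs.getD k0 ' ' = c := by rw [List.getD_eq_getElem cs ' ' hk0]; exact hk0c
  have hwK : candP cs (k0+1) ∈ keptList cs c := memK_P cs c k0 hk0 hk0d
  obtain ⟨wt, hw⟩ := candP_head cs k0 hk0
  obtain ⟨mb, hmb⟩ : ∃ mb, PySem.List.min? (keptList cs c) (fun x => x) = some mb := by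
    cases h : PySem.List.min? (keptList cs c) (fun x => x) with
    | none => exact absurd ((PySem.List.min?_eq_none_iff _ _).mp h) (List.ne_nil_of_mem hwK)
    | some mb => exact ⟨mb, rfl⟩
  have hmbK : mb ∈ keptList cs c := PySem.List.min?_mem hmb
  have hmb2 : @PySem.List.min? (List Char) (List Char) LinearOrder.toPartialOrder.toPreorder.toLT
      LinearOrder.toDecidableLT (keptList cs c) (fun x => x) = some mb := by
    rw [← hmb]; congr 1
  have hmbmin : ∀ y ∈ keptList cs c, mb ≤ y := fun y hy => by
    simpa using PySem.List.min?_isMin hmb2 y hy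
  rw [hmb, Option.getD_some]
  have hMA := PySem.List.foldl_min_le
    ((List.range cs.length).flatMap (fun k => [candP cs (k + 1), candS cs (k + 1)])) cs
  apply le_antisymm
  · exact hMA.2 mb (kept_sub cs c mb hmbK)
  · have dom : ∀ (h : Char) (t : List Char), h ∈ cs →
        (h = c → (h :: t) ∈ keptList cs c) → mb ≤ h :: t := by
      intro h t hmem hin
      by_cases hc' : h = c
      · exact hmbmin _ (hin hc')
      · have hlt : c < h := lt_of_le_of_ne (hcmin h hmem) (Ne.symm hc')
        calc mb ≤ candP cs (k0+1) := hmbmin _ hwK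
          _ = c :: wt := by rw [hw, hk0d]
          _ ≤ h :: t := le_of_lt (List.Lex.rel hlt)
    rcases PySem.List.foldl_min_mem
        ((List.range cs.length).flatMap (fun k => [candP cs (k + 1), candS cs (k + 1)])) cs
      with hMAe | hMAm
    · rw [hMAe]
      cases cs with
      | nil => exact absurd rfl hne
      | cons a tl =>
        have := dom a tl (by simp) (fun hac => by
          have hmem1 : candP (a::tl) 1 ∈ keptList (a::tl) c :=
            memK_P (a::tl) c 0 (by simp) (by simpa using hac)
          rwa [candP_one] at hmem1)
        simpa using this
    · rw [List.mem_flatMap] at hMAm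
      obtain ⟨k, hkr, hx⟩ := hMAm
      have hkn : k < cs.length := List.mem_range.mp hkr
      have hx' : List.foldl min cs ((List.range cs.length).flatMap
            (fun k => [candP cs (k + 1), candS cs (k + 1)])) = candP cs (k+1)
          ∨ List.foldl min cs ((List.range cs.length).flatMap
            (fun k => [candP cs (k + 1), candS cs (k + 1)])) = candS cs (k+1) := by
        simpa using hx
      rcases hx' with he | he
      · rw [he]
        obtain ⟨t, ht⟩ := candP_head cs k hkn
        rw [ht]
        refine dom _ _ ?_ (fun hkc => by rw [← ht]; exact memK_P cs c k hkn hkc)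
        rw [List.getD_eq_getElem cs ' ' hkn]; exact List.getElem_mem hkn
      · rw [he]
        by_cases hm : k + 1 < cs.length
        · obtain ⟨t, ht⟩ := candS_head cs (k+1) hm
          rw [ht]
          refine dom _ _ ?_ (fun h0c => by rw [← ht]; exact memK_S cs c (cs.length - (k+1)) (by omega) h0c)
          rw [List.getD_eq_getElem cs ' ' (by omega)]
          exact List.getElem_mem (by omega)
        · have hmeq : k + 1 = cs.length := by omega
          rw [hmeq, candS_self]
          obtain ⟨t, ht⟩ := rev_head cs hne
          rw [ht]
          exact dom _ _ (List.getLast_mem hne)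
            (fun hlc => by rw [← ht]; exact memK_rev cs c hne hlc)

-- ===== VERDICT (by name: the statement is the Claim_ definition above) =====
theorem lexSmallest_spec : Claim_equal_lexSmallest := by
  intro s _
  show lexSmallest s = lexSmallest_alt s
  by_cases hne : s.toList = []
  · simp only [lexSmallest_alt, if_pos hne, lexSmallest]
    rw [show PySem.List.pyRange 1 ((s.toList.length:Int) + 1) 1 = [] from by
      rw [PySem.List.pyRange_one]; simp [hne]]
    simp [String.ofList_toList]
  · obtain ⟨c, hc⟩ : ∃ c, PySem.List.min? s.toList (fun x => x) = some c := by
      cases h : PySem.List.min? s.toList (fun x => x) with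
      | none => exact absurd ((PySem.List.min?_eq_none_iff _ _).mp h) hne
      | some c => exact ⟨c, rfl⟩
    rw [A_norm s, B_norm s hne c hc, master s.toList hne c hc]
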